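-- pv_equiv track=rewrite | github.com/leliel12/jbc-utn | 5to/IA/practicos/convolucion.py | _get_matrix_size
-- ===== SOURCE A (Python) =====
-- def _get_matrix_size(mtx):
--     ''' _get_matrix_size(mtx=[[]]) -> (n,m)
--     Retorna un par (n,n) donde n es la cantidad de filas de la matriz
--     y n es la cantidad de columnas.'''
--     rows = len(mtx)
--     cols = None
--     for row in mtx:
--         if cols is None:
--             cols = len(row)
--         if cols != len(row):
--             raise ValueError("la cantidad de columnas de la matriz " +
--             "debe ser igual en cada fila")
--     return (rows, cols)
-- ===== SOURCE B (Python) =====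
-- def _get_matrix_size(mtx):
--     if not mtx:
--         return (0, None)
--     lens = [len(row) for row in mtx]
--     lo = min(lens)
--     hi = max(lens)
--     if lo != hi:
--         raise ValueError("la cantidad de columnas de la matriz " +
--         "debe ser igual en cada fila")
--     return (len(mtx), hi)
-- ===== Notes on version B (the rewrite author's own statement) =====
-- stated objective: alternative
-- what changed: Replaces A's per-row compare-to-first early-exit loop by computing the minimum and maximum of all row lengths and checking once that they coincide (uniform iff min == max).
-- outside the precondition, e.g. on _get_matrix_size([]): A returns (0, None), B returns (0, None); on _get_matrix_size([[1], [1, 2]]): A raises ValueError, B raises ValueError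
import Mathlib
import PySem

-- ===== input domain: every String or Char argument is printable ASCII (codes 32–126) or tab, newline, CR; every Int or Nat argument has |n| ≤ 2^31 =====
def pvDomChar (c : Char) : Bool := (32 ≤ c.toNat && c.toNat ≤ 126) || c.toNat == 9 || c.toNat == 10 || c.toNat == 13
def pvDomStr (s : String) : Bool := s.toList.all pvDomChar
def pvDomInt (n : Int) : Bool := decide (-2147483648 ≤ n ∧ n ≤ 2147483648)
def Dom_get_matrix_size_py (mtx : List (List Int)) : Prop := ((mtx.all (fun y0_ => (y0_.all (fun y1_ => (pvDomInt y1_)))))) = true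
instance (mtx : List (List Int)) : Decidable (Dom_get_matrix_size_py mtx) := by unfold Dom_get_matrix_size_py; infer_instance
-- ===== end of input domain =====

-- B replaces A's per-row compare-to-first early-exit loop by computing the minimum and
-- maximum of all row lengths and checking once that they coincide (objective: alternative).

-- ===== PORT A =====
-- A's for-loop over rows with its 'cols' variable (None -> Option.none);
-- result 'none' = the ValueError raise (excluded by Pre_).
def pvALoop : List (List Int) → Option Int → Option (Option Int)
  | [], cols => some cols
  | row :: rest, cols =>
      let cols' := if cols.isNone then some ((row.length : Int)) else cols
      if cols' ≠ some ((row.length : Int)) then none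
      else pvALoop rest cols'

def get_matrix_size_py (mtx : List (List Int)) : Int × Int :=
  match pvALoop mtx none with
  | some (some c) => ((mtx.length : Int), c)
  | _ => (0, 0)   -- A raises (ragged) or returns cols=None (empty mtx): both outside Pre_

-- ===== PORT B =====
def get_matrix_size_py_alt (mtx : List (List Int)) : Int × Int :=
  if mtx.isEmpty then (0, 0)   -- B returns (0, None): outside Pre_ (None is not an Int)
  else
    let lens := mtx.map (fun row => ((row.length : Int)))
    -- min/max of a nonempty list; .getD 0 is unreachable (lens ≠ [] here)
    let lo := (PySem.List.min? lens (fun x : Int => x)).getD 0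
    let hi := (PySem.List.max? lens (fun x : Int => x)).getD 0
    if lo ≠ hi then (0, 0)   -- B raises ValueError: outside Pre_
    else ((mtx.length : Int), hi)

-- ===== PRECONDITION & SPEC =====
-- Pre_ excludes the empty matrix, where A returns (0, None) — None is not an Int, so the
-- value leaves the declared return type — and ragged matrices, where A raises ValueError.
def pvPreB : List (List Int) → Bool
  | [] => false
  | r :: t => t.all (fun x => x.length == r.length)
def Pre_get_matrix_size_py (mtx : List (List Int)) : Prop := pvPreB mtx = true
instance (mtx : List (List Int)) : Decidable (Pre_get_matrix_size_py mtx) := by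
  unfold Pre_get_matrix_size_py; infer_instance

def pvWitness_get_matrix_size_py : List (List Int) := [[1, 2], [3, 4]]

def Spec_get_matrix_size_py (mtx : List (List Int)) (out : Int × Int) : Prop := out = get_matrix_size_py_alt mtx
instance (mtx : List (List Int)) (out : Int × Int) : Decidable (Spec_get_matrix_size_py mtx out) := by unfold Spec_get_matrix_size_py; infer_instance

-- ===== CLAIM (what is proved, stated in full; the proofs are below) =====
def Claim_equal_get_matrix_size_py : Prop := ∀ (mtx : List (List Int)), Dom_get_matrix_size_py mtx → Pre_get_matrix_size_py mtx → Spec_get_matrix_size_py mtx (get_matrix_size_py mtx)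

-- ===== LEMMAS AND PROOFS =====

-- A's loop, once cols is fixed at L and every remaining row has length L, finishes with L.
theorem pvALoop_const (L : Int) :
    ∀ (l : List (List Int)), (∀ r ∈ l, (r.length : Int) = L) →
      pvALoop l (some L) = some (some L) := by
  intro l
  induction l with
  | nil => intro _; rfl
  | cons r t ih =>
      intro h
      have hr : (r.length : Int) = L := h r (by simp)
      simp [pvALoop, hr]
      exact ih (fun x hx => h x (by simp [hx]))

-- ===== VERDICT (by name: the statement is the Claim_ definition above) =====
theorem get_matrix_size_py_spec : Claim_equal_get_matrix_size_py := by
  intro mtx _ hpre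
  cases mtx with
  | nil => exact absurd hpre (by simp [Pre_get_matrix_size_py, pvPreB])
  | cons r t =>
      simp only [Pre_get_matrix_size_py, pvPreB, List.all_eq_true, beq_iff_eq] at hpre
      set L : Int := (r.length : Int) with hL
      have hallL : ∀ x ∈ r :: t, (x.length : Int) = L := by
        intro x hx
        rcases List.mem_cons.mp hx with h | h
        · simp [h, hL]
        · simp [hL, hpre x h]
      -- A's side
      have hA : get_matrix_size_py (r :: t) = (((r :: t).length : Int), L) := by
        have h1 : pvALoop (r :: t) none = pvALoop t (some L) := by
          simp [pvALoop, hL]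
        have h2 : pvALoop t (some L) = some (some L) :=
          pvALoop_const L t (fun x hx => hallL x (by simp [hx]))
        simp [get_matrix_size_py, h1, h2]
      -- B's side
      have hlensL : ∀ x ∈ (r :: t).map (fun row => ((row.length : Int))), x = L := by
        intro x hx
        simp only [List.mem_map] at hx
        obtain ⟨row, hrow, hxe⟩ := hx
        rw [← hxe]; exact hallL row hrow
      have foldl_min_const : ∀ (l : List Int), (∀ x ∈ l, x = L) → l.foldl min L = L := by
        intro l
        induction l with
        | nil => intro _; rfl
        | cons x t ih =>
            intro h
            have hx : x = L := h x (by simp)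
            simp only [List.foldl_cons, hx, min_self]
            exact ih (fun y hy => h y (by simp [hy]))
      have foldl_max_const : ∀ (l : List Int), (∀ x ∈ l, x = L) → l.foldl max L = L := by
        intro l
        induction l with
        | nil => intro _; rfl
        | cons x t ih =>
            intro h
            have hx : x = L := h x (by simp)
            simp only [List.foldl_cons, hx, max_self]
            exact ih (fun y hy => h y (by simp [hy]))
      have htail : ∀ x ∈ t.map (fun row => ((row.length : Int))), x = L := by
        intro x hx
        exact hlensL x (by simp only [List.map_cons]; exact List.mem_cons_of_mem _ hx)
      have hB : get_matrix_size_py_alt (r :: t) = (((r :: t).length : Int), L) := by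
        unfold get_matrix_size_py_alt
        simp only [List.isEmpty_cons, List.map_cons,
          PySem.List.min?_id_cons, PySem.List.max?_id_cons, Option.getD_some]
        have h1 : (t.map (fun row => ((row.length : Int)))).foldl min ((r.length : Int)) = L := by
          rw [hL]; exact foldl_min_const _ htail
        have h2 : (t.map (fun row => ((row.length : Int)))).foldl max ((r.length : Int)) = L := by
          rw [hL]; exact foldl_max_const _ htail
        rw [h1, h2]
        simp
      simp [Spec_get_matrix_size_py, hA, hB]
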